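-- pv_equiv track=rewrite | github.com/nashs789/Algorithm--Study | src/ReetCode/Easy/1to100/Q67/Q67_Add Binary.py | checkRest
-- ===== SOURCE A (Python) =====
-- def checkRest(arr, idx, carry, result):
--     while 0 <= idx:
--         if arr[idx] == "1":
--             result.append("0" if carry else "1")
--             carry = True if carry else False
--         else:
--             result.append("1" if carry else "0")
--             carry = False
--
--         idx -= 1
--
--     return carry
-- ===== SOURCE B (Python) =====
-- def checkRest(arr, idx, carry, result):
--     # Slice-and-scan decomposition; same return value and same appended digits as A.
--     if idx < 0:
--         return carry
--     digits = ["1" if d == "1" else "0" for d in reversed(arr[:idx + 1])]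
--     if not carry:
--         result.extend(digits)
--         return False
--     flip = next((k for k, d in enumerate(digits) if d == "0"), None)
--     if flip is None:
--         result.extend("0" for _ in digits)
--         return True
--     result.extend(["0"] * flip + ["1"] + digits[flip + 1:])
--     return False
-- ===== Notes on version B (the rewrite author's own statement) =====
-- stated objective: alternative
-- what changed: A walks idx down to 0 threading a carry flag through a per-digit branch; B materialises the reversed normalized prefix arr[:idx+1] once, and with carry locates the first '0' digit (flip point) to emit zeros/the flipped one/the copied tail in bulk, returning True exactly when no flip point exists.
import Mathlib
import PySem

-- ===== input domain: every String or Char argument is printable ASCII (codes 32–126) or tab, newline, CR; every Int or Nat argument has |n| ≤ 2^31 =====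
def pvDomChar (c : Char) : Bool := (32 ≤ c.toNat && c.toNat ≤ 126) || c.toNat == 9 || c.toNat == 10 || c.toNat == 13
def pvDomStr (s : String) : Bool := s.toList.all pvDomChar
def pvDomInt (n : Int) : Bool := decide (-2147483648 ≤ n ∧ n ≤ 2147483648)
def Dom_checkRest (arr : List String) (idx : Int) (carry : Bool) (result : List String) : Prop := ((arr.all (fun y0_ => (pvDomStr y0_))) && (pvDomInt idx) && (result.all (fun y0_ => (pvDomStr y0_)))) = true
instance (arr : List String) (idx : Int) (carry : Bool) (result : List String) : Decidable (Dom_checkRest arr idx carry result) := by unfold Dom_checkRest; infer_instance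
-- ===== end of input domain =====

-- B replaces A's per-digit carry-threading loop by a slice-and-scan decomposition
-- (materialise the reversed normalized prefix once, locate the flip point);
-- equivalence is about the RETURN value only (both Pythons also append the same
-- digits to `result`, but that mutation is not part of the ported value).

-- ===== PORT A =====
-- A's while-loop: walk idx down to 0, branching on arr[idx], threading carry.
def checkRestA (arr : List String) (idx : Int) (carry : Bool) : Bool :=
  if h : 0 ≤ idx then
    match PySem.List.pyGet? arr idx with
    | some s =>
        if s == "1" then
          checkRestA arr (idx - 1) (if carry then true else false)
        else
          checkRestA arr (idx - 1) false
    | none => false   -- IndexError in Python; excluded by Pre_checkRest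
  else carry
termination_by (idx + 1).toNat
decreasing_by all_goals (simp at h ⊢; omega)

def checkRest (arr : List String) (idx : Int) (carry : Bool) (result : List String) : Bool :=
  checkRestA arr idx carry

-- ===== PORT B =====
-- B: early return for idx < 0; build `digits` = normalized reversed prefix
-- arr[:idx+1]; without carry return False; with carry find the first "0"
-- (the flip point) — none means all ones, i.e. carry out True.
def checkRest_alt (arr : List String) (idx : Int) (carry : Bool) (result : List String) : Bool :=
  if idx < 0 then carry
  else
    let digits := ((PySem.List.slice arr none (some (idx + 1))).reverse).map
      (fun d => if d == "1" then "1" else "0")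
    if !carry then false
    else
      match digits.findIdx? (fun d => d == "0") with
      | none => true
      | some _ => false

-- ===== PRECONDITION & SPEC =====
-- Pre_ excludes exactly the IndexError inputs: when the loop runs (0 ≤ idx),
-- idx must be a valid index of arr.
def Pre_checkRest (arr : List String) (idx : Int) (carry : Bool) (result : List String) : Prop :=
  idx < (arr.length : Int)
instance (arr : List String) (idx : Int) (carry : Bool) (result : List String) : Decidable (Pre_checkRest arr idx carry result) := by unfold Pre_checkRest; infer_instance

def pvWitness_checkRest : List String × Int × Bool × List String := (["1", "0", "1"], 2, true, ["0"])

def Spec_checkRest (arr : List String) (idx : Int) (carry : Bool) (result : List String) (out : Bool) : Prop := out = checkRest_alt arr idx carry result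
instance (arr : List String) (idx : Int) (carry : Bool) (result : List String) (out : Bool) : Decidable (Spec_checkRest arr idx carry result out) := by unfold Spec_checkRest; infer_instance

-- ===== CLAIM =====
def Claim_equal_checkRest : Prop := ∀ (arr : List String) (idx : Int) (carry : Bool) (result : List String), Dom_checkRest arr idx carry result → Pre_checkRest arr idx carry result → Spec_checkRest arr idx carry result (checkRest arr idx carry result)

-- ===== LEMMAS AND PROOFS =====

-- A's loop computes: carry AND "every digit of the prefix arr[:idx+1] is '1'".
theorem checkRestA_eq_all (arr : List String) :
    ∀ (n : Nat) (idx : Int) (carry : Bool), (idx + 1).toNat = n → idx < (arr.length : Int) →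
      checkRestA arr idx carry = (carry && (arr.take (idx + 1).toNat).all (fun d => d == "1")) := by
  intro n
  induction n with
  | zero =>
      intro idx carry hn _
      have hneg : ¬ 0 ≤ idx := by omega
      have h0 : (idx + 1).toNat = 0 := hn
      rw [checkRestA]
      simp [hneg, h0]
  | succ m ih =>
      intro idx carry hn hlt
      have hpos : 0 ≤ idx := by omega
      have hidx : idx.toNat < arr.length := by omega
      have hget : PySem.List.pyGet? arr idx = some (arr[idx.toNat]'hidx) :=
        PySem.List.pyGet?_eq_some_getElem arr hpos hlt
      have htn : (idx + 1).toNat = idx.toNat + 1 := by omega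
      have htake : arr.take (idx.toNat + 1) = arr.take idx.toNat ++ [arr[idx.toNat]'hidx] := by
        rw [List.take_add_one, List.getElem?_eq_getElem hidx]; rfl
      have hrec := fun c => ih (idx - 1) c (by omega) (by omega)
      have htn' : (idx - 1 + 1).toNat = idx.toNat := by omega
      rw [checkRestA]
      simp only [hpos, dif_pos, hget, htn]
      by_cases h1 : arr[idx.toNat]'hidx = "1"
      · simp only [h1, BEq.rfl, if_true]
        rw [hrec _, htn', htake, List.all_append]
        cases carry <;> simp [h1]
      · have hb : (arr[idx.toNat]'hidx == "1") = false := by simp [h1]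
        have hall : (arr.take (idx.toNat + 1)).all (fun d => d == "1") = false := by
          rw [htake, List.all_append]; simp [hb]
        simp only [hb, Bool.false_eq_true, if_false]
        rw [hrec _, htn', hall]
        simp

-- B's flip-point search finds no "0" iff every prefix digit is "1".
theorem findIdx?_none_iff_all (l : List String) :
    ((l.reverse.map (fun d => if d == "1" then "1" else "0")).findIdx?
        (fun d => d == "0") = none)
      ↔ (l.all (fun d => d == "1") = true) := by
  rw [List.findIdx?_eq_none_iff]
  simp only [List.mem_map, List.mem_reverse, List.all_eq_true]
  constructor
  · intro h d hd
    have := h _ ⟨d, hd, rfl⟩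
    by_cases h1 : (d == "1") = true
    · exact h1
    · simp [h1] at this
  · rintro h x ⟨d, hd, rfl⟩
    have := h d hd
    simp [this]

-- ===== VERDICT =====
theorem checkRest_spec : Claim_equal_checkRest := by
  intro arr idx carry result _ hpre
  unfold Spec_checkRest checkRest checkRest_alt
  rw [checkRestA_eq_all arr (idx + 1).toNat idx carry rfl hpre]
  by_cases hneg : idx < 0
  · have h0 : (idx + 1).toNat = 0 := by omega
    simp [hneg, h0]
  · have hge : (0:Int) ≤ idx + 1 := by omega
    simp only [hneg, if_false]
    rw [PySem.List.slice_to arr hge]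
    by_cases hc : carry
    · simp only [hc, Bool.not_true, Bool.false_eq_true, if_false, Bool.true_and]
      rcases hfind : ((arr.take (idx+1).toNat).reverse.map
          (fun d => if d == "1" then "1" else "0")).findIdx? (fun d => d == "0") with _ | k
      · exact ((findIdx?_none_iff_all _).mp hfind)
      · by_contra hall
        have : (arr.take (idx+1).toNat).all (fun d => d == "1") = true := by
          revert hall; cases h : (arr.take (idx+1).toNat).all (fun d => d == "1") <;> simp
        rw [(findIdx?_none_iff_all _).mpr this] at hfind
        cases hfind
    · simp [hc]
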